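-- pv_equiv track=rewrite | github.com/hunter686868/learning | 8 tasks/walkers.py | find_stalkers
-- ===== SOURCE A (Python) =====
-- def find_stalkers(village, i, digit, sum_v, flag):
--     if i == len(village):
--         if flag >= 1:
--             return True
--         return False
--     value = village[i]
--     if digit and value == '=':
--         sum_v += 1
--     elif value.isdigit():
--         sum_d = digit + int(value)
--         digit = int(value)
--         if sum_d == 10 and sum_v != 3:
--             return False
--         elif sum_d == 10 and sum_v == 3:
--             flag += 1
--             sum_v = 0
--     return find_stalkers(village, i+1, digit, sum_v, flag)
-- ===== SOURCE B (Python) =====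
-- def find_stalkers(village, i, digit, sum_v, flag):
--     for j in range(i, len(village)):
--         value = village[j]
--         if digit and value == '=':
--             sum_v += 1
--         elif value.isdigit():
--             sum_d = digit + int(value)
--             digit = int(value)
--             if sum_d == 10:
--                 if sum_v != 3:
--                     return False
--                 flag += 1
--                 sum_v = 0
--     return flag >= 1
-- ===== Notes on version B (the rewrite author's own statement) =====
-- stated objective: idiomatic
-- what changed: Replaced the tail recursion that re-passes all five parameters on every character with a single iterative for-loop over range(i, len(village)) mutating local state, with a plain flag >= 1 result.
import Mathlib
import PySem

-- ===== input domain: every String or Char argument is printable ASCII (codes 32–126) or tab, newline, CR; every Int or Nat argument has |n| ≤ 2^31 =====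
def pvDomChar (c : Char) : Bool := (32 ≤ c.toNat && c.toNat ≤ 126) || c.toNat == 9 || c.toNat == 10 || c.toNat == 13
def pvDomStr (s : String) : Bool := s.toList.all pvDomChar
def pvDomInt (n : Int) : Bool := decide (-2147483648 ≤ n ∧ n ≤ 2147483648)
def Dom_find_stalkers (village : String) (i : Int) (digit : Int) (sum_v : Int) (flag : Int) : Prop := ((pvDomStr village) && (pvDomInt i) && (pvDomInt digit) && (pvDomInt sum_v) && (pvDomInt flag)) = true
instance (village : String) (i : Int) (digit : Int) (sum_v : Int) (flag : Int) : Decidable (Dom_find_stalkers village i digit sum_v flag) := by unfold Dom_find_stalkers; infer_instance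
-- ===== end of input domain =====

-- B replaces A's five-argument tail recursion by a plain iterative for-loop over range(i, len(village)) (objective: idiomatic; same cost).

-- ===== PORT A =====
-- A's tail recursion over the string, step for step; the `none` branch of village[i] is a Python IndexError, excluded by Pre_.
def find_stalkers_go (cs : List Char) (i : Int) (digit : Int) (sum_v : Int) (flag : Int) : Bool :=
  if i = (cs.length : Int) then
    if flag ≥ 1 then true else false
  else
    match h : PySem.List.pyGet? cs i with
    | none => false  -- Python: IndexError (outside Pre_)
    | some value =>
      if digit ≠ 0 ∧ value = '=' then
        find_stalkers_go cs (i+1) digit (sum_v + 1) flag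
      else if PySem.Chars.isdigit value then
        let d := (PySem.Int.ofChars? [value]).getD 0  -- int(value); guarded by isdigit, never the default
        let sum_d := digit + d
        if sum_d = 10 ∧ sum_v ≠ 3 then false
        else if sum_d = 10 ∧ sum_v = 3 then
          find_stalkers_go cs (i+1) d 0 (flag + 1)
        else
          find_stalkers_go cs (i+1) d sum_v flag
      else
        find_stalkers_go cs (i+1) digit sum_v flag
termination_by ((cs.length : Int) - i).toNat
decreasing_by
  all_goals
    have hin : PySem.Raise.InRange cs.length i := by
      by_contra hc
      rw [← PySem.List.pyGet?_eq_none_iff (xs := cs) (i := i)] at hc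
      simp [hc] at h
    unfold PySem.Raise.InRange at hin
    omega

def find_stalkers (village : String) (i : Int) (digit : Int) (sum_v : Int) (flag : Int) : Bool :=
  find_stalkers_go village.toList i digit sum_v flag

-- ===== PORT B =====
-- B's loop body over the remaining indices; `none` result = the early `return False`.
def find_stalkers_alt_go (cs : List Char) (digit : Int) (sum_v : Int) (flag : Int) : List Int → Option Int
  | [] => some flag
  | j :: rest =>
    match PySem.List.pyGet? cs j with
    | none => none  -- Python: IndexError (outside Pre_)
    | some value =>
      if digit ≠ 0 ∧ value = '=' then
        find_stalkers_alt_go cs digit (sum_v + 1) flag rest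
      else if PySem.Chars.isdigit value then
        let d := (PySem.Int.ofChars? [value]).getD 0  -- int(value)
        if digit + d = 10 then
          if sum_v ≠ 3 then none
          else find_stalkers_alt_go cs d 0 (flag + 1) rest
        else find_stalkers_alt_go cs d sum_v flag rest
      else
        find_stalkers_alt_go cs digit sum_v flag rest

def find_stalkers_alt (village : String) (i : Int) (digit : Int) (sum_v : Int) (flag : Int) : Bool :=
  let cs := village.toList
  match find_stalkers_alt_go cs digit sum_v flag (PySem.List.pyRange i (cs.length : Int) 1) with
  | none => false
  | some flag' => flag' ≥ 1

-- ===== PRECONDITION & SPEC =====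
-- Pre_ excludes exactly the inputs on which Python A raises IndexError: i past the end or beyond negative wraparound.
def Pre_find_stalkers (village : String) (i : Int) (digit : Int) (sum_v : Int) (flag : Int) : Prop :=
  -(village.toList.length : Int) ≤ i ∧ i ≤ (village.toList.length : Int)
instance (village : String) (i : Int) (digit : Int) (sum_v : Int) (flag : Int) : Decidable (Pre_find_stalkers village i digit sum_v flag) := by unfold Pre_find_stalkers; infer_instance

def pvWitness_find_stalkers : String × Int × Int × Int × Int := ("7=3==1", 0, 0, 0, 0)

def Spec_find_stalkers (village : String) (i : Int) (digit : Int) (sum_v : Int) (flag : Int) (out : Bool) : Prop := out = find_stalkers_alt village i digit sum_v flag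
instance (village : String) (i : Int) (digit : Int) (sum_v : Int) (flag : Int) (out : Bool) : Decidable (Spec_find_stalkers village i digit sum_v flag out) := by unfold Spec_find_stalkers; infer_instance

-- ===== CLAIM (what is proved, stated in full; the proofs are below) =====
def Claim_equal_find_stalkers : Prop := ∀ (village : String) (i : Int) (digit : Int) (sum_v : Int) (flag : Int), Dom_find_stalkers village i digit sum_v flag → Pre_find_stalkers village i digit sum_v flag → Spec_find_stalkers village i digit sum_v flag (find_stalkers village i digit sum_v flag)

-- ===== LEMMAS AND PROOFS =====

-- A's recursion from index i equals B's loop over the index list range(i, len cs), for i ≤ len cs.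
theorem go_eq (cs : List Char) (i digit sum_v flag : Int) (hle : i ≤ (cs.length : Int)) :
    find_stalkers_go cs i digit sum_v flag =
      (match find_stalkers_alt_go cs digit sum_v flag (PySem.List.pyRange i (cs.length : Int) 1) with
       | none => false
       | some flag' => flag' ≥ 1) := by
  by_cases hi : i = (cs.length : Int)
  · subst hi
    rw [PySem.List.pyRange_one_eq_nil (by omega)]
    simp [find_stalkers_go, find_stalkers_alt_go]
  · have hlt : i < (cs.length : Int) := lt_of_le_of_ne hle hi
    rw [PySem.List.pyRange_one_cons hlt]
    rw [find_stalkers_go]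
    simp only [if_neg hi]
    unfold find_stalkers_alt_go
    cases h : PySem.List.pyGet? cs i with
    | none => simp
    | some value =>
      simp only []
      by_cases h1 : digit ≠ 0 ∧ value = '='
      · rw [if_pos h1, if_pos h1, go_eq cs (i+1) digit (sum_v+1) flag (by omega)]
      · rw [if_neg h1, if_neg h1]
        by_cases h2 : PySem.Chars.isdigit value = true
        · rw [if_pos h2, if_pos h2]
          set d := (PySem.Int.ofChars? [value]).getD 0 with hd
          by_cases h3 : digit + d = 10
          · by_cases h4 : sum_v = 3
            · rw [if_neg (by tauto), if_pos ⟨h3, h4⟩, if_pos h3, if_neg (by tauto),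
                  go_eq cs (i+1) d 0 (flag+1) (by omega)]
            · rw [if_pos ⟨h3, h4⟩, if_pos h3, if_pos h4]
          · rw [if_neg (by tauto), if_neg (by tauto), if_neg h3,
                go_eq cs (i+1) d sum_v flag (by omega)]
        · rw [if_neg h2, if_neg h2, go_eq cs (i+1) digit sum_v flag (by omega)]
termination_by ((cs.length : Int) - i).toNat
decreasing_by all_goals omega

-- ===== VERDICT (by name: the statement is the Claim_ definition above) =====
theorem find_stalkers_spec : Claim_equal_find_stalkers := by
  intro village i digit sum_v flag _ hpre
  unfold Spec_find_stalkers find_stalkers find_stalkers_alt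
  exact go_eq village.toList i digit sum_v flag hpre.2
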